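-- pv_equiv track=rewrite | github.com/testingautomated-usi/simple-tip | src/core/text_corruptor.py | bad_autocompletes
-- ===== SOURCE A (Python) =====
-- from typing import Dict, List, Optional
--
-- MIN_COMMON_START_FOR_AUTOCOMPLETE = 3
--
-- def bad_autocompletes(
--     word: str, start_bags: Dict[int, Dict[str, List[str]]], common_letters: int
-- ) -> Optional[List[str]]:
--     """Returns a list of words which start with the same letters as the passed word."""
--     if common_letters < MIN_COMMON_START_FOR_AUTOCOMPLETE:
--         # End of recursion, no common words found.
--         # This will only rarely happen in sufficiently large datasets.
--         return None
--
--     common_letters = min(common_letters, len(word))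
--     start = word[:common_letters]
--
--     try:
--         bag = start_bags[common_letters][start]
--     except KeyError:
--         bag = []
--
--     # Remove the word itself
--     try:
--         bag = [w for w in bag if w != word]
--     except ValueError:
--         pass
--
--     # Handle no-match-found by checking fewer common letters
--     if len(bag) == 0:
--         # Gracefully handle case where no other words start with the selected number of same letters
--         return bad_autocompletes(word, start_bags, common_letters=common_letters - 1)
--
--     return bag
-- ===== SOURCE B (Python) =====
-- MIN_COMMON_START_FOR_AUTOCOMPLETE = 3
--
-- def bad_autocompletes(word, start_bags, common_letters):
--     """Iterative countdown over prefix lengths instead of tail recursion."""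
--     if common_letters < MIN_COMMON_START_FOR_AUTOCOMPLETE:
--         return None
--     k0 = min(common_letters, len(word))
--     # first iteration always runs (the clamp may push k0 below the threshold);
--     # further iterations only down to the threshold
--     for k in range(k0, min(k0, MIN_COMMON_START_FOR_AUTOCOMPLETE) - 1, -1):
--         matches = [w for w in start_bags.get(k, {}).get(word[:k], []) if w != word]
--         if matches:
--             return matches
--     return None
-- ===== Notes on version B (the rewrite author's own statement) =====
-- stated objective: simpler
-- what changed: Replaces the tail recursion with a single for-loop counting the prefix length down over an explicit range (the clamp computed once up front), returning the first non-empty filtered bag.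
import Mathlib
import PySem

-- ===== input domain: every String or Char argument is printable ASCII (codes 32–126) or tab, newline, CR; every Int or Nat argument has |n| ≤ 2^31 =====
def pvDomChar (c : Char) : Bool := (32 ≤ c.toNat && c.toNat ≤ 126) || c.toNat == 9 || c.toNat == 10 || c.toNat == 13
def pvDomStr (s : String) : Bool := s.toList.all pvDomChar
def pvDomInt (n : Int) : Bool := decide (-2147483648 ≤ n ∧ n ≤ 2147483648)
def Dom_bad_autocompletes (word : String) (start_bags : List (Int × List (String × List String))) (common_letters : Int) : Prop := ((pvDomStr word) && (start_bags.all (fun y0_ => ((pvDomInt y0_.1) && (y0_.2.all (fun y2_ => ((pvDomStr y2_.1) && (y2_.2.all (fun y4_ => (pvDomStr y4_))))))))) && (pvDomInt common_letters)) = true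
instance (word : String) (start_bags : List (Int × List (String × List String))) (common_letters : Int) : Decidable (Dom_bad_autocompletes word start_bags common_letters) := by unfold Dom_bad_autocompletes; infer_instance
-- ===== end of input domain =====

-- B replaces A's tail recursion by one countdown for-loop over the prefix lengths (objective: simpler).

-- ===== PORT A =====
-- recursive, as in the Python: clamp, lookup (KeyError → []), filter, recurse on empty
def bad_autocompletes (word : String) (start_bags : List (Int × List (String × List String))) (common_letters : Int) : Option (List String) :=
  if common_letters < 3 then none
  else
    let cl := min common_letters (PySem.Str.len word)
    let start := PySem.Str.slice word none (some cl)
    let bag := (((PySem.Dict.mk start_bags).get? cl).bind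
      (fun inner => (PySem.Dict.mk inner).get? start)).getD []
    let bag := bag.filter (fun w => w != word)
    if bag.length = 0 then bad_autocompletes word start_bags (cl - 1)
    else some bag
termination_by (common_letters - 2).toNat
decreasing_by omega

-- ===== PORT B =====
-- the body of B's for-loop: try each k in the range list, return the first non-empty filtered bag
def badAutoLoop (word : String) (start_bags : List (Int × List (String × List String))) : List Int → Option (List String)
  | [] => none
  | k :: ks =>
    let ms := ((PySem.Dict.mk ((PySem.Dict.mk start_bags).getD k [])).getD
        (PySem.Str.slice word none (some k)) []).filter (fun w => w != word)
    if ms = [] then badAutoLoop word start_bags ks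
    else some ms

def bad_autocompletes_alt (word : String) (start_bags : List (Int × List (String × List String))) (common_letters : Int) : Option (List String) :=
  if common_letters < 3 then none
  else
    let k0 := min common_letters (PySem.Str.len word)
    badAutoLoop word start_bags (PySem.List.pyRange k0 (min k0 3 - 1) (-1))

-- ===== PRECONDITION & SPEC =====
def Spec_bad_autocompletes (word : String) (start_bags : List (Int × List (String × List String))) (common_letters : Int) (out : Option (List String)) : Prop := out = bad_autocompletes_alt word start_bags common_letters
instance (word : String) (start_bags : List (Int × List (String × List String))) (common_letters : Int) (out : Option (List String)) : Decidable (Spec_bad_autocompletes word start_bags common_letters out) := by unfold Spec_bad_autocompletes; infer_instance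

-- ===== CLAIM (what is proved, stated in full; the proofs are below) =====
def Claim_equal_bad_autocompletes : Prop := ∀ (word : String) (start_bags : List (Int × List (String × List String))) (common_letters : Int), Dom_bad_autocompletes word start_bags common_letters → Spec_bad_autocompletes word start_bags common_letters (bad_autocompletes word start_bags common_letters)

-- ===== LEMMAS AND PROOFS =====

-- the filtered bag both programs compute at prefix length k
def pvBag (word : String) (start_bags : List (Int × List (String × List String))) (k : Int) : List String :=
  ((((PySem.Dict.mk start_bags).get? k).bind
      (fun inner => (PySem.Dict.mk inner).get? (PySem.Str.slice word none (some k)))).getD []).filter (fun w => w != word)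

-- A's double-getD equals B's bind-then-getD lookup
lemma pvBag_eq_loop_bag (word : String) (start_bags : List (Int × List (String × List String))) (k : Int) :
    ((PySem.Dict.mk ((PySem.Dict.mk start_bags).getD k [])).getD
        (PySem.Str.slice word none (some k)) []).filter (fun w => w != word)
      = pvBag word start_bags k := by
  unfold pvBag
  cases h : List.find? (fun p => p.1 == k) start_bags with
  | none => simp [PySem.Dict.getD, PySem.Dict.get?, h]
  | some inner => simp [PySem.Dict.getD, PySem.Dict.get?, h]

lemma badAutoLoop_cons (word : String) (start_bags : List (Int × List (String × List String))) (k : Int) (ks : List Int) :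
    badAutoLoop word start_bags (k :: ks)
      = if pvBag word start_bags k = [] then badAutoLoop word start_bags ks
        else some (pvBag word start_bags k) := by
  simp only [badAutoLoop, pvBag_eq_loop_bag]

-- A's unfolding in terms of pvBag
lemma bad_autocompletes_unfold (word : String) (start_bags : List (Int × List (String × List String))) (cl : Int) :
    bad_autocompletes word start_bags cl
      = if cl < 3 then none
        else if pvBag word start_bags (min cl (PySem.Str.len word)) = [] then
          bad_autocompletes word start_bags (min cl (PySem.Str.len word) - 1)
        else some (pvBag word start_bags (min cl (PySem.Str.len word))) := by
  rw [bad_autocompletes]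
  by_cases h : cl < 3
  · simp [h]
  · simp only [h, if_false, pvBag, List.length_eq_zero_iff]

-- for k ≤ len word, the countdown loop from k to 3 is exactly A at k
lemma loop_eq_rec (word : String) (start_bags : List (Int × List (String × List String))) (k : Int)
    (hk : k ≤ PySem.Str.len word) :
    badAutoLoop word start_bags (PySem.List.pyRange k 2 (-1)) = bad_autocompletes word start_bags k := by
  by_cases h3 : k < 3
  · rw [PySem.List.pyRange_neg_one_eq_nil (by omega), bad_autocompletes_unfold]
    simp [h3, badAutoLoop]
  · rw [PySem.List.pyRange_neg_one_cons (by omega), badAutoLoop_cons,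
      bad_autocompletes_unfold]
    have hmin : min k (PySem.Str.len word) = k := by omega
    rw [hmin]
    simp only [h3, if_false]
    rw [loop_eq_rec word start_bags (k - 1) (by omega)]
termination_by (k - 2).toNat
decreasing_by omega

-- ===== VERDICT (by name: the statement is the Claim_ definition above) =====
theorem bad_autocompletes_spec : Claim_equal_bad_autocompletes := by
  intro word start_bags cl _
  unfold Spec_bad_autocompletes bad_autocompletes_alt
  by_cases h3 : cl < 3
  · rw [bad_autocompletes_unfold]; simp [h3]
  · simp only [h3, if_false]
    have hl : 0 ≤ PySem.Str.len word := by simp [PySem.Str.len]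
    set L := PySem.Str.len word with hL
    by_cases hle : cl ≤ L
    · -- no clamp: k0 = cl ≥ 3
      have hmin : min cl L = cl := by omega
      rw [hmin]
      have : min cl 3 - 1 = 2 := by omega
      rw [this]
      exact (loop_eq_rec word start_bags cl hle).symm
    · -- clamp to L
      have hmin : min cl L = L := by omega
      rw [hmin]
      by_cases hL3 : L < 3
      · -- clamped below threshold: single iteration, then done
        have : min L 3 - 1 = L - 1 := by omega
        rw [this, PySem.List.pyRange_neg_one_cons (by omega),
          PySem.List.pyRange_neg_one_eq_nil (by omega), badAutoLoop_cons,
          bad_autocompletes_unfold]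
        simp only [h3, if_false, ← hL, hmin]
        rw [bad_autocompletes_unfold]
        simp [badAutoLoop, show L - 1 < 3 by omega]
      · -- clamped but still ≥ 3: A at cl equals A at L
        have h2 : min L 3 - 1 = 2 := by omega
        rw [h2, loop_eq_rec word start_bags L (le_refl L)]
        rw [bad_autocompletes_unfold word start_bags cl]
        conv_rhs => rw [bad_autocompletes_unfold word start_bags L]
        simp only [h3, if_false, ← hL, hmin, min_self, show ¬ L < 3 from hL3]
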